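-- pv_equiv track=rewrite | github.com/irupawala/Ibrahim-List | Ibrahim Personal/Ready/ADMSU/AA&C/PAs/Week 4/school_bus/school_bus_study.py | printPowerSet
-- ===== SOURCE A (Python) =====
-- def printPowerSet(set):
--
--     set_size = len(set)
--     pow_set_size = (int) (2**set_size)
--     power_set = []
--
--     for counter in range(pow_set_size):
--         sub_set = []
--         for binary in range(set_size):
--             if ((1 << binary) & counter) > 0:
--                 sub_set.append(set[binary])
--         if 0 in sub_set: # Only adding the subsets with starting point 0 in it
--             power_set.append(sub_set)
--     return power_set
-- ===== SOURCE B (Python) =====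
-- def printPowerSet(set):
--     result = [[]]
--     for x in set:
--         result = result + [s + [x] for s in result]
--     return [s for s in result if 0 in s]
-- ===== Notes on version B (the rewrite author's own statement) =====
-- stated objective: simpler
-- what changed: Replaces the bitmask counter with nested bit-shift loop by incremental power-set doubling (result = result + [s + [x] for s in result] for each element), then a single filter keeping subsets containing 0.
import Mathlib
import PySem

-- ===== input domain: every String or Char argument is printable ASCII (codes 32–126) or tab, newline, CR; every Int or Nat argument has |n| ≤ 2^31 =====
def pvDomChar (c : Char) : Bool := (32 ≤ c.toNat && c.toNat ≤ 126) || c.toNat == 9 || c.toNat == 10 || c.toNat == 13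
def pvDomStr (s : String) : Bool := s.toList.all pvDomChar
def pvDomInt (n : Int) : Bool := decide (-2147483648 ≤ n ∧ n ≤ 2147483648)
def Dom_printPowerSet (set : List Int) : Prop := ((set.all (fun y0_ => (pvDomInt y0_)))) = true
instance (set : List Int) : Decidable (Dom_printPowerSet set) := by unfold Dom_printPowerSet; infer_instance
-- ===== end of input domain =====

-- B replaces A's bitmask-counter enumeration by incremental power-set doubling plus one final filter: simpler, same result.

-- ===== PORT A =====
-- Literal port of A. counter and binary are always ≥ 0 (both ranges start at 0), so '.toNat'
-- on them and Nat's &&&/<<< are exact for Python's '&'/'<<' here; 'set[binary]' has binary in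
-- range inside the loop, so pyGetD is exact; '0 in sub_set' is List.contains.
def printPowerSet (set : List Int) : List (List Int) :=
  let set_size : Int := set.length
  let pow_set_size : Int := 2 ^ set_size.toNat
  (PySem.List.pyRange 0 pow_set_size 1).foldl (fun power_set counter =>
    let sub_set := (PySem.List.pyRange 0 set_size 1).foldl (fun sub_set binary =>
      if ((1 <<< binary.toNat) &&& counter.toNat : Nat) > 0 then
        sub_set ++ [PySem.List.pyGetD set binary 0]
      else sub_set) ([] : List Int)
    if sub_set.contains 0 then power_set ++ [sub_set] else power_set) []

-- ===== PORT B =====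
def printPowerSet_alt (set : List Int) : List (List Int) :=
  let result := set.foldl (fun result x => result ++ result.map (fun s => s ++ [x])) [[]]
  result.filter (fun s => s.contains 0)

-- ===== PRECONDITION & SPEC =====
def Spec_printPowerSet (set : List Int) (out : List (List Int)) : Prop := out = printPowerSet_alt set
instance (set : List Int) (out : List (List Int)) : Decidable (Spec_printPowerSet set out) := by unfold Spec_printPowerSet; infer_instance

-- ===== CLAIM (what is proved, stated in full; the proofs are below) =====
def Claim_equal_printPowerSet : Prop := ∀ (set : List Int), Dom_printPowerSet set → Spec_printPowerSet set (printPowerSet set)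

-- ===== LEMMAS AND PROOFS =====

-- the subset A's inner loop builds for a given counter, in clean form
def pvSub (c : Nat) (s : List Int) : List Int :=
  ((List.range s.length).filter (fun i => c.testBit i)).map (fun i => s.getD i 0)

-- B's doubling loop
def pvGrow (s : List Int) : List (List Int) :=
  s.foldl (fun result x => result ++ result.map (fun t => t ++ [x])) [[]]

theorem pvCond (c k : Nat) : decide ((1 <<< k) &&& c > 0) = c.testBit k := by
  rw [Nat.one_shiftLeft, Nat.two_pow_and]
  cases h : c.testBit k <;> simp

theorem pvSub_low (c : Nat) (s : List Int) (x : Int) (hc : c < 2 ^ s.length) :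
    pvSub c (s ++ [x]) = pvSub c s := by
  unfold pvSub
  have h1 : (s ++ [x]).length = s.length + 1 := by simp
  rw [h1, List.range_succ, List.filter_append]
  have h2 : List.filter (fun i => c.testBit i) [s.length] = [] := by
    simp [Nat.testBit_lt_two_pow hc]
  rw [h2, List.append_nil]
  apply List.map_congr_left
  intro i hi
  exact List.getD_append s [x] 0 i (List.mem_range.mp (List.mem_of_mem_filter hi))

theorem pvSub_high (c : Nat) (s : List Int) (x : Int) (hc : c < 2 ^ s.length) :
    pvSub (2 ^ s.length + c) (s ++ [x]) = pvSub c s ++ [x] := by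
  unfold pvSub
  have h1 : (s ++ [x]).length = s.length + 1 := by simp
  rw [h1, List.range_succ, List.filter_append]
  have hn : (2 ^ s.length + c).testBit s.length = true := by
    simp [Nat.testBit_two_pow_add_eq, Nat.testBit_lt_two_pow hc]
  have h2 : List.filter (fun i => (2 ^ s.length + c).testBit i) [s.length] = [s.length] := by
    simp [hn]
  have h3 : List.filter (fun i => (2 ^ s.length + c).testBit i) (List.range s.length)
      = List.filter (fun i => c.testBit i) (List.range s.length) := by
    apply List.filter_congr
    intro i hi
    exact Nat.testBit_two_pow_add_gt (List.mem_range.mp hi) c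
  rw [h2, h3, List.map_append]
  congr 1
  · apply List.map_congr_left
    intro i hi
    exact List.getD_append s [x] 0 i (List.mem_range.mp (List.mem_of_mem_filter hi))
  · simp [List.getD]

theorem pvGrow_eq (s : List Int) :
    (List.range (2 ^ s.length)).map (fun c => pvSub c s) = pvGrow s := by
  induction s using List.reverseRecOn with
  | nil => rfl
  | append_singleton s x ih =>
    have h1 : (s ++ [x]).length = s.length + 1 := by simp
    rw [h1, Nat.two_pow_succ, List.range_add, List.map_append, List.map_map]
    have hA : (List.range (2 ^ s.length)).map (fun c => pvSub c (s ++ [x])) = pvGrow s := by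
      rw [← ih]
      apply List.map_congr_left
      intro c hc
      exact pvSub_low c s x (List.mem_range.mp hc)
    have hB : (List.range (2 ^ s.length)).map ((fun c => pvSub c (s ++ [x])) ∘ (2 ^ s.length + ·))
        = (pvGrow s).map (fun t => t ++ [x]) := by
      rw [← ih, List.map_map]
      apply List.map_congr_left
      intro c hc
      exact pvSub_high c s x (List.mem_range.mp hc)
    rw [hA, hB]
    show pvGrow s ++ _ = pvGrow (s ++ [x])
    unfold pvGrow
    rw [List.foldl_append]
    rfl

-- A's inner loop computes pvSub
theorem pvInner (s : List Int) (c : Nat) :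
    (PySem.List.pyRange 0 (s.length : Int) 1).foldl (fun sub_set binary =>
      if ((1 <<< binary.toNat) &&& c : Nat) > 0 then
        sub_set ++ [PySem.List.pyGetD s binary 0]
      else sub_set) ([] : List Int) = pvSub c s := by
  rw [PySem.List.pyRange_one]
  simp only [sub_zero, Int.toNat_natCast, List.foldl_map, zero_add,
    PySem.List.pyGetD_natCast]
  rw [PySem.List.foldl_append_ite]
  simp only [List.nil_append]
  unfold pvSub
  congr 1
  apply List.filter_congr
  intro k _
  exact pvCond c k

theorem printPowerSet_eq (s : List Int) :
    printPowerSet s = ((List.range (2 ^ s.length)).map (fun c => pvSub c s)).filter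
      (fun t => t.contains 0) := by
  have h2 : ((2 : Int) ^ s.length) = ((2 ^ s.length : Nat) : Int) := by push_cast; rfl
  simp only [printPowerSet, Int.toNat_natCast, pvInner]
  rw [h2, PySem.List.pyRange_one]
  simp only [sub_zero, Int.toNat_natCast, List.foldl_map, zero_add]
  rw [PySem.List.foldl_append_if]
  simp only [List.nil_append]
  rw [List.filter_map]
  rfl

-- ===== VERDICT (by name: the statement is the Claim_ definition above) =====
theorem printPowerSet_spec : Claim_equal_printPowerSet := by
  intro s _
  show printPowerSet s = printPowerSet_alt s
  rw [printPowerSet_eq, pvGrow_eq]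
  rfl
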